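-- pv_equiv track=rewrite | github.com/lylali/nlp-sql-assistant | legacy_assistant/joins.py | infer_fk_edges
-- ===== SOURCE A (Python) =====
-- from typing import Dict, Any, List, Tuple
--
-- def _pk_for(learned: Dict[str,Any], table: str) -> str:
--     cols = learned["tables"][table]["columns"]
--     if "id" in cols: return "id"
--     cand = f"{table.rstrip('s')}_id"
--     if cand in cols: return cand
--     # fallback: first *_id
--     for c in cols:
--         if c.endswith("_id"): return c
--     # absolute fallback: first column
--     return cols[0]
--
-- def infer_fk_edges(learned: Dict[str,Any]) -> List[Tuple[str,str,str,str]]: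
--     """
--     Infer FKs by:
--       1) Column name equals another table's PK (exact): users.org_id -> organizations.org_id
--       2) Column stem matches table name or its singular: policy_id -> policy/policies
--       3) Fallback: stem is contained in table name (org -> organizations)
--     Returns edges as (src_table, src_col, dst_table, dst_pk).
--     """
--     edges: List[Tuple[str,str,str,str]] = []
--     tables = list(learned.get("tables", {}).keys())
--
--     # precompute PKs
--     pks = {t: _pk_for(learned, t) for t in tables}
--
--     for t in tables:
--         for c in learned["tables"][t]["columns"]:
--             if not c.endswith("_id"):
--                 continue
--             stem = c[:-3].lower()
--             # 1) exact PK name match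
--             for u in tables:
--                 if u == t: continue
--                 if c == pks[u]:
--                     edges.append((t, c, u, pks[u])); break
--             else:
--                 # 2) exact/singular table name match
--                 for u in tables:
--                     if u == t: continue
--                     if u.lower() == stem or u.rstrip("s").lower() == stem.rstrip("s"):
--                         edges.append((t, c, u, pks[u])); break
--                 else:
--                     # 3) containment (org in organizations)
--                     for u in tables:
--                         if u == t: continue
--                         if stem and (stem in u.lower() or u.lower() in stem):
--                             edges.append((t, c, u, pks[u])); break
--     return edges
-- ===== SOURCE B (Python) =====
-- # B: one priority-scoring pass over the tables replaces A's three sequential for-else passes;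
-- # dict items are iterated directly instead of re-looking keys up.
--
-- def _pk_for(cols, table):
--     if "id" in cols:
--         return "id"
--     cand = table.rstrip("s") + "_id"
--     if cand in cols:
--         return cand
--     return next((c for c in cols if c.endswith("_id")), cols[0])
--
-- def _priority(t, stem, c, u, pk):
--     if u == t:
--         return None
--     if c == pk:
--         return 1
--     if u.lower() == stem or u.rstrip("s").lower() == stem.rstrip("s"):
--         return 2
--     if stem and (stem in u.lower() or u.lower() in stem):
--         return 3
--     return None
--
-- def _best(t, stem, c, pks):
--     best = None  # (priority, table, its pk); smallest priority wins, earliest table breaks ties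
--     for u, pk in pks.items():
--         p = _priority(t, stem, c, u, pk)
--         if p is None:
--             continue
--         if best is None or p < best[0]:
--             best = (p, u, pk)
--     return best
--
-- def infer_fk_edges(learned):
--     tables = learned.get("tables", {})
--     pks = {t: _pk_for(meta["columns"], t) for t, meta in tables.items()}
--     edges = []
--     for t, meta in tables.items():
--         for c in meta["columns"]:
--             if not c.endswith("_id"):
--                 continue
--             stem = c[:-3].lower()
--             b = _best(t, stem, c, pks)
--             if b is not None:
--                 edges.append((t, c, b[1], b[2]))
--     return edges
-- ===== Notes on version B (the rewrite author's own statement) =====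
-- stated objective: simpler
-- what changed: A's three sequential for-else passes over the tables per *_id column are replaced by one priority-scoring scan (1 = exact PK match, 2 = table-name/singular match, 3 = containment) keeping the smallest priority with earliest-table tie-break, and dict items are iterated directly instead of re-looking keys up.
import Mathlib
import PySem

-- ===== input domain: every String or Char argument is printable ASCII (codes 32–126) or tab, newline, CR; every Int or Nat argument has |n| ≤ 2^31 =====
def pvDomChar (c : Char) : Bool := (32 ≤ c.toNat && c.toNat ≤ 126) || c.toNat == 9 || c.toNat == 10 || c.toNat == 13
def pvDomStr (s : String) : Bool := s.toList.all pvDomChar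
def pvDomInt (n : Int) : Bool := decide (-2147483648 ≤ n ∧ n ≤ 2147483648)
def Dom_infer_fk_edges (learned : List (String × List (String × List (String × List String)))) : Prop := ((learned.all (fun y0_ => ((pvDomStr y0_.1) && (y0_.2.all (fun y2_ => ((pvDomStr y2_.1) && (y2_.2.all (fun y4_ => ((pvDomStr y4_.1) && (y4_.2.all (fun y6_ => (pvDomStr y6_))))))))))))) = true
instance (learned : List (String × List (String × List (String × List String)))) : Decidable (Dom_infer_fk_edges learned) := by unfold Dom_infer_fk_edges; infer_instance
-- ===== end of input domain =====

-- B replaces A's three sequential for-else passes per *_id column by one priority-scoring scan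
-- of the tables (objective: simpler); same return value on Pre_ (no duplicate dict keys, every
-- table carries a nonempty "columns" list).


-- ===== PORT A =====
-- shared primitive helper: Python's  s.rstrip("s")  — drops trailing 's' code points (exact)
def pvRstripS (s : String) : String := String.ofList ((s.toList.reverse.dropWhile (fun ch => ch == 's')).reverse)

-- shared primitive helper: Python string concatenation a + b, on code points (exact)
def pvCat (a b : String) : String := String.ofList (a.toList ++ b.toList)

-- learned["tables"][t]["columns"]; the .getD [] marks the KeyError points (excluded by Pre_)
def pvColsA (tables : List (String × List (String × List String))) (t : String) : List String :=
  (((PySem.Dict.mk tables).get? t).bind (fun m => (PySem.Dict.mk m).get? "columns")).getD []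

-- _pk_for (A): takes learned["tables"] and the table name, looks the columns up itself
def pv_pk_for (tables : List (String × List (String × List String))) (table : String) : String :=
  let cols := pvColsA tables table
  if cols.contains "id" then "id"
  else
    let cand := pvCat (pvRstripS table) "_id"
    if cols.contains cand then cand
    else
      match cols.find? (fun c => PySem.Str.endswith c "_id") with
      | some c => c
      | none => (PySem.List.pyGet? cols 0).getD ""   -- cols[0]; none = IndexError, excluded by Pre_

-- pks[u]; every u scanned is a key of pks, so the default is never the value used inside Pre_
def pvPkLookup (pks : List (String × String)) (u : String) : String :=
  (PySem.Dict.mk pks).getD u ""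

def infer_fk_edges (learned : List (String × List (String × List (String × List String)))) : List (String × String × String × String) :=
  let tables := ((PySem.Dict.mk learned).get? "tables").getD []
  let tnames := (PySem.Dict.mk tables).keys
  let pks := tnames.map (fun t => (t, pv_pk_for tables t))
  tnames.foldl (fun edges t =>
    (pvColsA tables t).foldl (fun edges c =>
      if !(PySem.Str.endswith c "_id") then edges
      else
        let stem := PySem.Str.lower (PySem.Str.slice c none (some (-3)))
        match tnames.find? (fun u => u != t && c == pvPkLookup pks u) with
        | some u => edges ++ [(t, c, u, pvPkLookup pks u)]
        | none =>
          match tnames.find? (fun u => u != t && (PySem.Str.lower u == stem || PySem.Str.lower (pvRstripS u) == pvRstripS stem)) with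
          | some u => edges ++ [(t, c, u, pvPkLookup pks u)]
          | none =>
            match tnames.find? (fun u => u != t && (stem != "" && (PySem.Str.isIn stem (PySem.Str.lower u) || PySem.Str.isIn (PySem.Str.lower u) stem))) with
            | some u => edges ++ [(t, c, u, pvPkLookup pks u)]
            | none => edges) edges) []

-- ===== PORT B =====
-- _pk_for (B): takes the columns list directly
def pv_pk_for_alt (cols : List String) (table : String) : String :=
  if cols.contains "id" then "id"
  else
    let cand := pvCat (pvRstripS table) "_id"
    if cols.contains cand then cand
    else (cols.find? (fun c => PySem.Str.endswith c "_id")).getD ((PySem.List.pyGet? cols 0).getD "")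

-- _priority (B)
def pvPriority (t stem c u pk : String) : Option Nat :=
  if u == t then none
  else if c == pk then some 1
  else if PySem.Str.lower u == stem || PySem.Str.lower (pvRstripS u) == pvRstripS stem then some 2
  else if stem != "" && (PySem.Str.isIn stem (PySem.Str.lower u) || PySem.Str.isIn (PySem.Str.lower u) stem) then some 3
  else none

-- _best (B): smallest priority wins, earliest table breaks ties
def pvBest (t stem c : String) (pks : List (String × String)) : Option (Nat × String × String) :=
  pks.foldl (fun best up =>
    match pvPriority t stem c up.1 up.2 with
    | none => best
    | some p =>
      match best with
      | none => some (p, up.1, up.2)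
      | some b => if p < b.1 then some (p, up.1, up.2) else some b) none

def infer_fk_edges_alt (learned : List (String × List (String × List (String × List String)))) : List (String × String × String × String) :=
  let tables := ((PySem.Dict.mk learned).get? "tables").getD []
  let pks := tables.map (fun tm => (tm.1, pv_pk_for_alt (((PySem.Dict.mk tm.2).get? "columns").getD []) tm.1))
  tables.foldl (fun edges tm =>
    (((PySem.Dict.mk tm.2).get? "columns").getD []).foldl (fun edges c =>
      if PySem.Str.endswith c "_id" then
        let stem := PySem.Str.lower (PySem.Str.slice c none (some (-3)))
        match pvBest tm.1 stem c pks with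
        | some b => edges ++ [(tm.1, c, b.2.1, b.2.2)]
        | none => edges
      else edges) edges) []

-- ===== PRECONDITION & SPEC =====
-- Pre_ excludes the tables whose "columns" entry is missing or empty: there A raises
-- KeyError/IndexError in _pk_for.  The Nodup conjuncts exclude no Python input at all: they only
-- pin the association-list encoding to the unique one a Python dict produces (no duplicate keys),
-- which is what makes the ports' first-match lookups faithful.
def Pre_infer_fk_edges (learned : List (String × List (String × List (String × List String)))) : Prop :=
  (learned.map Prod.fst).Nodup ∧
  ((((PySem.Dict.mk learned).get? "tables").getD []).map Prod.fst).Nodup ∧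
  ∀ tm ∈ ((PySem.Dict.mk learned).get? "tables").getD [],
    (tm.2.map Prod.fst).Nodup ∧ ((PySem.Dict.mk tm.2).get? "columns").getD [] ≠ []
instance (learned : List (String × List (String × List (String × List String)))) : Decidable (Pre_infer_fk_edges learned) := by unfold Pre_infer_fk_edges; infer_instance

def pvWitness_infer_fk_edges : (List (String × List (String × List (String × List String)))) :=
  [("tables", [("users", [("columns", ["id", "org_id"])]), ("orgs", [("columns", ["id"])])])]

def Spec_infer_fk_edges (learned : List (String × List (String × List (String × List String)))) (out : List (String × String × String × String)) : Prop := out = infer_fk_edges_alt learned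
instance (learned : List (String × List (String × List (String × List String)))) (out : List (String × String × String × String)) : Decidable (Spec_infer_fk_edges learned out) := by unfold Spec_infer_fk_edges; infer_instance

-- ===== CLAIM (what is proved, stated in full; the proofs are below) =====
def Claim_equal_infer_fk_edges : Prop := ∀ (learned : List (String × List (String × List (String × List String)))), Dom_infer_fk_edges learned → Pre_infer_fk_edges learned → Spec_infer_fk_edges learned (infer_fk_edges learned)

-- ===== LEMMAS AND PROOFS =====

-- first-match find? with predicates equal on the members
theorem pv_find?_congr_mem {α : Type} (l : List α) (p q : α → Bool)
    (h : ∀ x ∈ l, p x = q x) : l.find? p = l.find? q := by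
  induction l with
  | nil => rfl
  | cons x l ih =>
    simp only [List.find?_cons, h x (List.mem_cons_self)]
    cases q x
    · exact ih (fun y hy => h y (List.mem_cons_of_mem _ hy))
    · rfl

-- "keep the earlier unless the later has strictly smaller priority"
def pvComb (a b : Option (Nat × String × String)) : Option (Nat × String × String) :=
  match a, b with
  | none, b => b
  | a, none => a
  | some p, some q => if q.1 < p.1 then some q else some p

theorem pvComb_assoc (a b c : Option (Nat × String × String)) :
    pvComb (pvComb a b) c = pvComb a (pvComb b c) := by
  cases a with
  | none => rfl
  | some p =>
    cases b with
    | none => rfl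
    | some q =>
      cases c with
      | none =>
        by_cases h1 : q.1 < p.1 <;> simp [pvComb, h1]
      | some r =>
        by_cases h1 : q.1 < p.1 <;> by_cases h2 : r.1 < q.1 <;> by_cases h3 : r.1 < p.1 <;>
          simp [pvComb, h1, h2, h3] <;> omega

theorem pvBest_go (t stem c : String) (l : List (String × String)) : ∀ acc,
    l.foldl (fun best up =>
      match pvPriority t stem c up.1 up.2 with
      | none => best
      | some p =>
        match best with
        | none => some (p, up.1, up.2)
        | some b => if p < b.1 then some (p, up.1, up.2) else some b) acc
    = pvComb acc (pvBest t stem c l) := by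
  induction l with
  | nil => intro acc; cases acc <;> simp [pvBest, pvComb]
  | cons up l ih =>
    intro acc
    have hstep : ∀ a, (match pvPriority t stem c up.1 up.2 with
        | none => a
        | some p =>
          match a with
          | none => some (p, up.1, up.2)
          | some b => if p < b.1 then some (p, up.1, up.2) else some b)
        = pvComb a ((pvPriority t stem c up.1 up.2).map (fun p => (p, up.1, up.2))) := by
      intro a
      cases pvPriority t stem c up.1 up.2 <;> cases a <;> simp [pvComb]
    rw [List.foldl_cons, ih, hstep]
    have hcons : pvBest t stem c (up :: l)
        = pvComb ((pvPriority t stem c up.1 up.2).map (fun p => (p, up.1, up.2))) (pvBest t stem c l) := by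
      show List.foldl _ _ (up :: l) = _
      rw [List.foldl_cons, ih, hstep]
      cases (pvPriority t stem c up.1 up.2).map (fun p => (p, up.1, up.2)) <;> simp [pvComb]
    rw [hcons, pvComb_assoc]

theorem pvBest_cons (t stem c : String) (up : String × String) (l : List (String × String)) :
    pvBest t stem c (up :: l)
      = pvComb ((pvPriority t stem c up.1 up.2).map (fun p => (p, up.1, up.2))) (pvBest t stem c l) := by
  show List.foldl _ _ (up :: l) = _
  rw [List.foldl_cons, pvBest_go]
  cases h : pvPriority t stem c up.1 up.2 <;> cases hb : pvBest t stem c l <;>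
    simp only [Option.map_some, Option.map_none, pvComb]

-- the if-chain of _priority, phrased with A's three stage predicates
theorem pvPriority_eq (t stem c u pk : String) :
    pvPriority t stem c u pk =
      if u != t && c == pk then some 1
      else if u != t && (PySem.Str.lower u == stem || PySem.Str.lower (pvRstripS u) == pvRstripS stem) then some 2
      else if u != t && (stem != "" && (PySem.Str.isIn stem (PySem.Str.lower u) || PySem.Str.isIn (PySem.Str.lower u) stem)) then some 3
      else none := by
  by_cases h0 : u = t <;> by_cases h1 : c = pk <;>
    by_cases h2a : PySem.Str.lower u = stem <;>
      by_cases h2b : PySem.Str.lower (pvRstripS u) = pvRstripS stem <;>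
        by_cases hs : stem = "" <;>
          cases hi1 : PySem.Chars.isIn stem.toList (PySem.Chars.lower u.toList) <;>
            cases hi2 : PySem.Chars.isIn (PySem.Chars.lower u.toList) stem.toList <;>
              simp [pvPriority, bne, h0, h1, h2a, h2b, hs, hi1, hi2]

set_option maxHeartbeats 1000000 in
-- the one-pass best IS A's three-stage search
theorem pvBest_eq_stages (t stem c : String) (l : List (String × String)) :
    pvBest t stem c l =
      match l.find? (fun up => up.1 != t && c == up.2) with
      | some up => some (1, up.1, up.2)
      | none =>
        match l.find? (fun up => up.1 != t && (PySem.Str.lower up.1 == stem || PySem.Str.lower (pvRstripS up.1) == pvRstripS stem)) with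
        | some up => some (2, up.1, up.2)
        | none =>
          (l.find? (fun up => up.1 != t && (stem != "" && (PySem.Str.isIn stem (PySem.Str.lower up.1) || PySem.Str.isIn (PySem.Str.lower up.1) stem)))).map (fun up => (3, up.1, up.2)) := by
  induction l with
  | nil => rfl
  | cons up l ih =>
    rw [pvBest_cons, ih, pvPriority_eq]
    cases hg1 : (up.1 != t && c == up.2) <;>
      cases hg2 : (up.1 != t && (PySem.Str.lower up.1 == stem || PySem.Str.lower (pvRstripS up.1) == pvRstripS stem)) <;>
        cases hg3 : (up.1 != t && (stem != "" && (PySem.Str.isIn stem (PySem.Str.lower up.1) || PySem.Str.isIn (PySem.Str.lower up.1) stem))) <;>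
          cases hf1 : l.find? (fun up => up.1 != t && c == up.2) <;>
            cases hf2 : l.find? (fun up => up.1 != t && (PySem.Str.lower up.1 == stem || PySem.Str.lower (pvRstripS up.1) == pvRstripS stem)) <;>
              cases hf3 : l.find? (fun up => up.1 != t && (stem != "" && (PySem.Str.isIn stem (PySem.Str.lower up.1) || PySem.Str.isIn (PySem.Str.lower up.1) stem))) <;>
                (simp only [List.find?_cons, hg1, hg2, hg3, hf1, hf2, hf3, if_true,
                  Option.map_some, Option.map_none, pvComb]; try rfl)

theorem infer_fk_edges_eq (learned : List (String × List (String × List (String × List String))))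
    (hpre : Pre_infer_fk_edges learned) : infer_fk_edges learned = infer_fk_edges_alt learned := by
  obtain ⟨hnd0, hndT, hcolsAll⟩ := hpre
  simp only [infer_fk_edges, infer_fk_edges_alt]
  set T := ((PySem.Dict.mk learned).get? "tables").getD [] with hTdef
  have hkeys : (PySem.Dict.mk T).keys = T.map Prod.fst := by simp [PySem.Dict.keys]
  have hget : ∀ tm ∈ T, (PySem.Dict.mk T).get? tm.1 = some tm.2 := by
    intro tm hm
    exact PySem.Dict.get?_of_mem_items _ (by exact hm) (by rw [hkeys]; exact hndT)
  have hcolsEq : ∀ tm ∈ T, pvColsA T tm.1 = ((PySem.Dict.mk tm.2).get? "columns").getD [] := by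
    intro tm hm
    unfold pvColsA
    rw [hget tm hm]
    rfl
  have hpkEq : ∀ tm ∈ T, pv_pk_for T tm.1
      = pv_pk_for_alt (((PySem.Dict.mk tm.2).get? "columns").getD []) tm.1 := by
    intro tm hm
    unfold pv_pk_for pv_pk_for_alt
    rw [hcolsEq tm hm]
    cases hfind : (((PySem.Dict.mk tm.2).get? "columns").getD []).find? (fun c => PySem.Str.endswith c "_id") <;>
      simp only [hfind, Option.getD_some, Option.getD_none]
  rw [hkeys, List.map_map]
  have hpks : T.map ((fun t => (t, pv_pk_for T t)) ∘ Prod.fst)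
      = T.map (fun tm => (tm.1, pv_pk_for_alt (((PySem.Dict.mk tm.2).get? "columns").getD []) tm.1)) :=
    List.map_congr_left (fun tm hm => by simp [Function.comp, hpkEq tm hm])
  rw [hpks]
  obtain ⟨P, hP⟩ : ∃ P, P = T.map (fun tm => (tm.1, pv_pk_for_alt (((PySem.Dict.mk tm.2).get? "columns").getD []) tm.1)) := ⟨_, rfl⟩
  rw [← hP]
  have hPfst : P.map Prod.fst = T.map Prod.fst := by
    rw [hP, List.map_map]
    exact List.map_congr_left (fun tm _ => rfl)
  have hPk : ∀ up ∈ P, pvPkLookup P up.1 = up.2 := by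
    intro up hup
    unfold pvPkLookup
    refine PySem.Dict.getD_of_mem_items _ (by exact hup) ?_ ""
    have : (PySem.Dict.mk P).keys = P.map Prod.fst := by simp [PySem.Dict.keys]
    rw [this, hPfst]
    exact hndT
  rw [List.foldl_map]
  apply PySem.List.foldl_congr_mem
  intro edges tm hm
  rw [hcolsEq tm hm]
  apply PySem.List.foldl_congr_mem
  intro edges' c hc
  cases hend : PySem.Str.endswith c "_id"
  · simp
  · simp only [Bool.not_true, Bool.false_eq_true, if_false, if_true]
    rw [pvBest_eq_stages]
    rw [show T.map Prod.fst = P.map Prod.fst from hPfst.symm]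
    rw [List.find?_map, List.find?_map, List.find?_map]
    simp only [Function.comp_def]
    rw [pv_find?_congr_mem P (fun up => up.1 != tm.1 && c == pvPkLookup P up.1)
      (fun up => up.1 != tm.1 && c == up.2)
      (fun up hup => by simp only [hPk up hup])]
    cases hf1 : P.find? (fun up => up.1 != tm.1 && c == up.2)
    · cases hf2 : P.find? (fun up => up.1 != tm.1 && (PySem.Str.lower up.1 == PySem.Str.lower (PySem.Str.slice c none (some (-3))) || PySem.Str.lower (pvRstripS up.1) == pvRstripS (PySem.Str.lower (PySem.Str.slice c none (some (-3))))))
      · cases hf3 : P.find? (fun up => up.1 != tm.1 && (PySem.Str.lower (PySem.Str.slice c none (some (-3))) != "" && (PySem.Str.isIn (PySem.Str.lower (PySem.Str.slice c none (some (-3)))) (PySem.Str.lower up.1) || PySem.Str.isIn (PySem.Str.lower up.1) (PySem.Str.lower (PySem.Str.slice c none (some (-3)))))))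
        · simp only [Option.map_none]
        · rename_i up
          have hup := hPk up (List.mem_of_find?_eq_some hf3)
          simp only [Option.map_some, Option.map_none, hup]
      · rename_i up
        have hup := hPk up (List.mem_of_find?_eq_some hf2)
        simp only [Option.map_some, Option.map_none, hup]
    · rename_i up
      have hup := hPk up (List.mem_of_find?_eq_some hf1)
      simp only [Option.map_some, hup]

-- ===== VERDICT (by name: the statement is the Claim_ definition above) =====
theorem infer_fk_edges_spec : Claim_equal_infer_fk_edges := by
  intro learned _ hpre
  unfold Spec_infer_fk_edges
  exact infer_fk_edges_eq learned hpre
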